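-- pv_equiv track=rewrite | github.com/imCr0w/algorytmy-maturalne | szyfrowanie.py | obliczSek
-- ===== SOURCE A (Python) =====
-- def obliczSek(dlug,level):
--     tab=[0 for i in range(level)]
--     poziom=0
--     zmieniacz=1
--     for i in range(dlug):
--         tab[poziom]+=1
--         poziom+=zmieniacz
--         if poziom==0:
--             zmieniacz=1
--         if poziom==level-1:
--             zmieniacz=-1
--     return tab
-- ===== SOURCE B (Python) =====
-- def obliczSek(dlug, level):
--     # Closed-form rail-fence row counts: full zigzag periods give a base count
--     # per row, then one partial sweep distributes the remainder. O(level) vs A's O(dlug).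
--     if dlug <= 0:
--         return [0] * level
--     if level == 1:
--         return [dlug]
--     p = 2 * level - 2
--     full, rem = divmod(dlug, p)
--     tab = [2 * full] * level
--     tab[0] = full
--     tab[-1] = full
--     for i in range(rem):
--         row = i if i < level else p - i
--         tab[row] += 1
--     return tab
-- ===== Notes on version B (the rewrite author's own statement) =====
-- stated objective: faster
-- what changed: A simulates the zigzag step by step over all dlug characters; B computes each row's count in closed form from the period 2*level-2 (full-period base counts: 1 for the end rows, 2 for middle rows, times dlug // period) plus one partial sweep for the remainder, so the work is O(level) instead of O(dlug).
-- crash fix: A raises IndexError when level <= 0 with dlug >= 1 (empty table) and when level == 1 with dlug >= 2 (poziom walks off the single row); in the latter case B returns [dlug], the natural one-row count, while for level <= 0 B raises too, so Raises_ covers exactly level == 1 and dlug >= 2. — e.g. on obliczSek(3, 1): A raises IndexError, B returns [3]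
import Mathlib
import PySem

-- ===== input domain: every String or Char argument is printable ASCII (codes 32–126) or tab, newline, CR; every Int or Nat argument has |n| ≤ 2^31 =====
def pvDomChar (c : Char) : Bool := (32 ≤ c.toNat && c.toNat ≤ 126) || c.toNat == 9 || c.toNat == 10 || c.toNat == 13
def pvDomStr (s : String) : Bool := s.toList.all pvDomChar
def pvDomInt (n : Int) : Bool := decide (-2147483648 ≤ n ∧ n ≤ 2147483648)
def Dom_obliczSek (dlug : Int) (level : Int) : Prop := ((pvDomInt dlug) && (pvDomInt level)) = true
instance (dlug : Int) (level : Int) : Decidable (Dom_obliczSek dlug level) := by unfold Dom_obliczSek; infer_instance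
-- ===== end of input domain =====

-- B replaces A's O(dlug) zigzag simulation by O(level) closed-form period arithmetic
-- (full-period base counts plus one partial remainder sweep); equivalence of return values proved.

-- ===== PORT A =====
def obliczSek (dlug : Int) (level : Int) : List Int :=
  let tab : List Int := (PySem.List.pyRange 0 level 1).map (fun _ => 0)
  let s := (PySem.List.pyRange 0 dlug 1).foldl
    (fun (st : List Int × Int × Int) _ =>
      let tab := st.1
      let poziom := st.2.1
      let zmieniacz := st.2.2
      let tab := tab.set poziom.toNat (tab.getD poziom.toNat 0 + 1)
      let poziom := poziom + zmieniacz
      let zmieniacz := if poziom = 0 then 1 else zmieniacz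
      let zmieniacz := if poziom = level - 1 then -1 else zmieniacz
      (tab, poziom, zmieniacz))
    (tab, 0, 1)
  s.1

-- ===== PORT B =====
def obliczSek_alt (dlug : Int) (level : Int) : List Int :=
  if dlug ≤ 0 then List.replicate level.toNat (0 : Int)
  else if level = 1 then [dlug]
  else
    let p := 2 * level - 2
    let full := PySem.Int.floordiv dlug p
    let rem := PySem.Int.mod dlug p
    let tab := List.replicate level.toNat (2 * full)
    let tab := tab.set 0 full
    let tab := tab.set (tab.length - 1) full
    (PySem.List.pyRange 0 rem 1).foldl
      (fun tab i =>
        let row := if i < level then i else p - i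
        tab.set row.toNat (tab.getD row.toNat 0 + 1))
      tab

-- ===== PRECONDITION & SPEC =====
-- Pre_ excludes exactly the inputs where A raises IndexError: level <= 0 with dlug >= 1,
-- and level == 1 with dlug >= 2 (poziom leaves the single-row table).
def Pre_obliczSek (dlug : Int) (level : Int) : Prop :=
  2 ≤ level ∨ dlug ≤ 0 ∨ (level = 1 ∧ dlug ≤ 1)
instance (dlug : Int) (level : Int) : Decidable (Pre_obliczSek dlug level) := by
  unfold Pre_obliczSek; infer_instance
def pvWitness_obliczSek : Int × Int := (11, 4)

-- A raises IndexError when level == 1 and dlug >= 2; B returns [dlug], the one-row visit count.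
def Raises_obliczSek (dlug : Int) (level : Int) : Prop := level = 1 ∧ 2 ≤ dlug
instance (dlug : Int) (level : Int) : Decidable (Raises_obliczSek dlug level) := by
  unfold Raises_obliczSek; infer_instance
def pvRaiseWitness_obliczSek : Int × Int := (3, 1)
def pvRaiseWitnessOut_obliczSek : List Int := [3]

def Spec_obliczSek (dlug : Int) (level : Int) (out : List Int) : Prop := out = obliczSek_alt dlug level
instance (dlug : Int) (level : Int) (out : List Int) : Decidable (Spec_obliczSek dlug level out) := by unfold Spec_obliczSek; infer_instance

-- ===== CLAIM (what is proved, stated in full; the proofs are below) =====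
def Claim_equal_obliczSek : Prop := ∀ (dlug : Int) (level : Int), Dom_obliczSek dlug level → Pre_obliczSek dlug level → Spec_obliczSek dlug level (obliczSek dlug level)
def Claim_raises_obliczSek : Prop := (∀ (dlug : Int) (level : Int), Dom_obliczSek dlug level → Raises_obliczSek dlug level → ¬ Pre_obliczSek dlug level) ∧ (Dom_obliczSek (pvRaiseWitness_obliczSek.1) (pvRaiseWitness_obliczSek.2) ∧ Raises_obliczSek (pvRaiseWitness_obliczSek.1) (pvRaiseWitness_obliczSek.2) ∧ obliczSek_alt (pvRaiseWitness_obliczSek.1) (pvRaiseWitness_obliczSek.2) = pvRaiseWitnessOut_obliczSek)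

-- ===== LEMMAS AND PROOFS =====

-- the zigzag row visited at step i, for level = L rails
def pvZig (L i : Nat) : Nat :=
  if i % (2 * L - 2) < L then i % (2 * L - 2) else (2 * L - 2) - i % (2 * L - 2)

-- the direction variable after step i
def pvDir (L i : Nat) : Int := if i % (2 * L - 2) < L - 1 then 1 else -1

-- number of visits of row j during the first n steps
def pvCnt (L n j : Nat) : Nat := (List.range n).countP (fun i => pvZig L i = j)

-- A's loop body as a named function (identical to the inline lambda in obliczSek)
def pvStepA (level : Int) (st : List Int × Int × Int) : List Int × Int × Int :=
  let tab := st.1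
  let poziom := st.2.1
  let zmieniacz := st.2.2
  let tab := tab.set poziom.toNat (tab.getD poziom.toNat 0 + 1)
  let poziom := poziom + zmieniacz
  let zmieniacz := if poziom = 0 then 1 else zmieniacz
  let zmieniacz := if poziom = level - 1 then -1 else zmieniacz
  (tab, poziom, zmieniacz)

lemma pvStepA_apply (level : Int) (tab : List Int) (poz zm : Int) :
    pvStepA level (tab, poz, zm) =
      (tab.set poz.toNat (tab.getD poz.toNat 0 + 1),
       poz + zm,
       if poz + zm = level - 1 then -1 else if poz + zm = 0 then 1 else zm) := rfl

lemma countP_congr' {α : Type} {l : List α} {p q : α → Bool} (h : ∀ a ∈ l, p a = q a) :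
    l.countP p = l.countP q :=
  List.countP_congr (fun a ha => by rw [h a ha])

lemma foldl_const_iterate {α β : Type} (f : α → α) (l : List β) (init : α) :
    l.foldl (fun s _ => f s) init = f^[l.length] init := by
  induction l generalizing init with
  | nil => rfl
  | cons b t ih => simp [List.foldl_cons, ih, Function.iterate_succ_apply]

lemma pvZig_lt (L i : Nat) (hL : 2 ≤ L) : pvZig L i < L := by
  unfold pvZig
  have h : i % (2 * L - 2) < 2 * L - 2 := Nat.mod_lt _ (by omega)
  split_ifs <;> omega

lemma pvCnt_succ (L n j : Nat) :
    pvCnt L (n + 1) j = pvCnt L n j + (if pvZig L n = j then 1 else 0) := by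
  unfold pvCnt
  rw [List.range_succ, List.countP_append]
  simp [List.countP_cons]

lemma pvMod_succ (L n : Nat) (hL : 2 ≤ L) :
    (n + 1) % (2 * L - 2) =
      (if n % (2 * L - 2) + 1 = 2 * L - 2 then 0 else n % (2 * L - 2) + 1) := by
  have h1 : (n + 1) % (2 * L - 2) = (n % (2 * L - 2) + 1 % (2 * L - 2)) % (2 * L - 2) :=
    Nat.add_mod n 1 _
  have h2 : 1 % (2 * L - 2) = 1 := Nat.mod_eq_of_lt (by omega)
  have hr : n % (2 * L - 2) < 2 * L - 2 := Nat.mod_lt _ (by omega)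
  rw [h1, h2]
  by_cases hc : n % (2 * L - 2) + 1 = 2 * L - 2
  · rw [hc, Nat.mod_self, if_pos rfl]
  · rw [if_neg hc, Nat.mod_eq_of_lt (by omega)]

lemma pvStep_pos (L n : Nat) (hL : 2 ≤ L) :
    (pvZig L n : Int) + pvDir L n = (pvZig L (n + 1) : Int) := by
  unfold pvZig pvDir
  have hr : n % (2 * L - 2) < 2 * L - 2 := Nat.mod_lt _ (by omega)
  rw [pvMod_succ L n hL]
  split_ifs <;> push_cast <;> omega

lemma pvStep_dir (L n : Nat) (hL : 2 ≤ L) :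
    (if (pvZig L (n + 1) : Int) = (L : Int) - 1 then (-1 : Int)
      else if (pvZig L (n + 1) : Int) = 0 then 1 else pvDir L n) = pvDir L (n + 1) := by
  unfold pvZig pvDir
  have hr : n % (2 * L - 2) < 2 * L - 2 := Nat.mod_lt _ (by omega)
  rw [pvMod_succ L n hL]
  split_ifs <;> omega

lemma pvSet_map_range (L j : Nat) (_hj : j < L) (f : Nat → Int) (v : Int) :
    ((List.range L).map f).set j v
      = (List.range L).map (fun k => if k = j then v else f k) := by
  apply List.ext_getElem
  · simp
  · intro k h1 h2
    simp only [List.getElem_set, List.getElem_map, List.getElem_range]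
    simp only [List.length_set, List.length_map, List.length_range] at h1
    rcases eq_or_ne k j with h | h
    · simp [h]
    · simp [h, Ne.symm h]

lemma pvGetD_map_range (L j : Nat) (hj : j < L) (f : Nat → Int) (d : Int) :
    (((List.range L).map f).getD j d) = f j := by
  rw [List.getD_eq_getElem?_getD]
  simp [hj]

-- A's loop invariant: after n iterations the state is (row counts, current row, direction)
lemma pvIterA (L : Nat) (hL : 2 ≤ L) (n : Nat) :
    (pvStepA (L : Int))^[n] ((List.range L).map (fun j => (pvCnt L 0 j : Int)), 0, 1)
      = ((List.range L).map (fun j => (pvCnt L n j : Int)), (pvZig L n : Int), pvDir L n) := by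
  induction n with
  | zero =>
      have h0 : pvZig L 0 = 0 := by unfold pvZig; simp; omega
      have h1 : pvDir L 0 = 1 := by unfold pvDir; rw [if_pos]; simp; omega
      simp [h0, h1]
  | succ n ih =>
      rw [Function.iterate_succ_apply', ih, pvStepA_apply]
      have hz := pvZig_lt L n hL
      refine congrArg₂ Prod.mk ?_ (congrArg₂ Prod.mk ?_ ?_)
      · simp only [Int.toNat_natCast]
        rw [pvGetD_map_range L _ hz, pvSet_map_range L _ hz]
        apply List.map_congr_left
        intro k hk
        rcases eq_or_ne k (pvZig L n) with h | h
        · simp [h, pvCnt_succ]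
        · simp [h, Ne.symm h, pvCnt_succ]
      · exact pvStep_pos L n hL
      · rw [pvStep_pos L n hL]
        exact pvStep_dir L n hL

-- every full period adds the base count
lemma pvZig_add_period (L i : Nat) : pvZig L ((2 * L - 2) + i) = pvZig L i := by
  unfold pvZig; rw [Nat.add_mod_left]

lemma pvCnt_add_period (L m j : Nat) :
    pvCnt L ((2 * L - 2) + m) j = pvCnt L (2 * L - 2) j + pvCnt L m j := by
  unfold pvCnt
  rw [List.range_add, List.countP_append, List.countP_map]
  congr 1
  apply List.countP_congr
  intro i _
  simp [Function.comp, pvZig_add_period]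

lemma pvCnt_decompose (L j : Nat) (q r : Nat) :
    pvCnt L ((2 * L - 2) * q + r) j = q * pvCnt L (2 * L - 2) j + pvCnt L r j := by
  induction q with
  | zero => simp
  | succ q ih =>
      have : (2 * L - 2) * (q + 1) + r = (2 * L - 2) + ((2 * L - 2) * q + r) := by ring_nf
      rw [this, pvCnt_add_period, ih]; ring

lemma pvCnt_full (L j : Nat) (hL : 2 ≤ L) (hj : j < L) :
    pvCnt L (2 * L - 2) j = if j = 0 ∨ j = L - 1 then 1 else 2 := by
  unfold pvCnt
  have hsplit : 2 * L - 2 = L + (L - 2) := by omega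
  rw [hsplit, List.range_add, List.countP_append, List.countP_map]
  have h1 : (List.range L).countP (fun i => decide (pvZig L i = j)) = 1 := by
    have hc : ∀ i ∈ List.range L, decide (pvZig L i = j) = decide (i = j) := by
      intro i hi
      simp only [List.mem_range] at hi
      have : pvZig L i = i := by
        unfold pvZig
        rw [Nat.mod_eq_of_lt (by omega), if_pos hi]
      rw [this]
    rw [countP_congr' hc]
    have : (List.range L).countP (fun i => decide (i = j)) = (List.range L).count j := by
      unfold List.count
      apply countP_congr'
      intro i _
      by_cases h : i = j <;> simp [h]
    rw [this, List.count_range, if_pos hj]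
  have h2 : (List.range (L - 2)).countP ((fun i => decide (pvZig L i = j)) ∘ (fun k => L + k))
      = if 1 ≤ j ∧ j ≤ L - 2 then 1 else 0 := by
    have hc : ∀ i ∈ List.range (L - 2),
        ((fun i => decide (pvZig L i = j)) ∘ (fun k => L + k)) i
          = decide (1 ≤ j ∧ j ≤ L - 2 ∧ i = L - 2 - j) := by
      intro i hi
      simp only [List.mem_range] at hi
      have hzz : pvZig L (L + i) = L - 2 - i := by
        unfold pvZig
        rw [Nat.mod_eq_of_lt (by omega), if_neg (by omega)]
        omega
      simp only [Function.comp, hzz]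
      simp only [decide_eq_decide]
      omega
    rw [countP_congr' hc]
    by_cases h : 1 ≤ j ∧ j ≤ L - 2
    · have hc2 : ∀ i ∈ List.range (L - 2),
          decide (1 ≤ j ∧ j ≤ L - 2 ∧ i = L - 2 - j) = decide (i = L - 2 - j) := by
        intro i _; simp [h.1, h.2]
      rw [countP_congr' hc2]
      have : (List.range (L - 2)).countP (fun i => decide (i = L - 2 - j))
          = (List.range (L - 2)).count (L - 2 - j) := by
        unfold List.count
        apply countP_congr'
        intro i _
        by_cases hh : i = L - 2 - j <;> simp [hh]
      rw [this, List.count_range, if_pos (by omega), if_pos h]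
    · have hc2 : ∀ i ∈ List.range (L - 2),
          decide (1 ≤ j ∧ j ≤ L - 2 ∧ i = L - 2 - j) = false := by
        intro i _; simp; omega
      rw [countP_congr' hc2, if_neg h]
      simp
  rw [h1, h2]
  split_ifs <;> omega

-- B's remainder loop adds the partial-sweep counts
lemma pvFoldB (L : Nat) (hL : 2 ≤ L) (g : Nat → Int) (m : Nat) (hm : m ≤ 2 * L - 2) :
    (PySem.List.pyRange 0 (m : Int) 1).foldl
      (fun tab i =>
        let row := if i < (L : Int) then i else 2 * (L : Int) - 2 - i
        tab.set row.toNat (tab.getD row.toNat 0 + 1))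
      ((List.range L).map g)
    = (List.range L).map (fun j => g j + (pvCnt L m j : Int)) := by
  induction m generalizing g with
  | zero =>
      rw [show ((0 : Nat) : Int) = 0 by rfl, PySem.List.pyRange_one_eq_nil (by omega)]
      simp [pvCnt]
  | succ m ih =>
      have hm' : m ≤ 2 * L - 2 := by omega
      have hz := pvZig_lt L m hL
      have hcast : ((m + 1 : Nat) : Int) = (m : Int) + 1 := by push_cast; ring
      rw [hcast, PySem.List.pyRange_one_succ_right (Int.natCast_nonneg m),
        List.foldl_append, ih g hm']
      simp only [List.foldl_cons, List.foldl_nil]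
      have hrow : (if (m : Int) < (L : Int) then (m : Int) else 2 * (L : Int) - 2 - (m : Int))
          = ((pvZig L m : Nat) : Int) := by
        unfold pvZig
        rw [Nat.mod_eq_of_lt (by omega)]
        split_ifs <;> omega
      rw [hrow]
      simp only [Int.toNat_natCast]
      rw [pvGetD_map_range L _ hz, pvSet_map_range L _ hz]
      apply List.map_congr_left
      intro k hk
      rcases eq_or_ne k (pvZig L m) with h | h
      · simp [h, pvCnt_succ]; ring
      · simp [h, Ne.symm h, pvCnt_succ]

-- the doubled base table with its two ends halved, as a map over rows
lemma pvTab (L : Nat) (v f : Int) (g : Nat → Int)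
    (hg : ∀ k, k < L → g k = if 0 = k then f else if L - 1 = k then f else v) :
    ((List.replicate L v).set 0 f).set (((List.replicate L v).set 0 f).length - 1) f
      = (List.range L).map g := by
  apply List.ext_getElem
  · simp
  · intro k h1 h2
    simp only [List.length_set, List.length_replicate] at h1
    rw [List.getElem_map, List.getElem_range]
    simp only [List.getElem_set, List.getElem_replicate, List.length_set, List.length_replicate]
    rw [hg k h1]
    split_ifs <;> first | rfl | (exfalso; omega)

-- A's result, characterised by the visit counts
lemma pvA_char (n L : Nat) (hL : 2 ≤ L) :
    obliczSek (n : Int) (L : Int) = (List.range L).map (fun j => (pvCnt L n j : Int)) := by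
  have h0 : (PySem.List.pyRange 0 (L : Int) 1).map (fun _ => (0 : Int))
      = (List.range L).map (fun j => (pvCnt L 0 j : Int)) := by
    simp [List.map_const', PySem.List.length_pyRange_one, pvCnt]
  have hlen : (PySem.List.pyRange 0 (n : Int) 1).length = n := by
    simp [PySem.List.length_pyRange_one]
  show ((PySem.List.pyRange 0 (n : Int) 1).foldl (fun st _ => pvStepA (L : Int) st)
      ((PySem.List.pyRange 0 (L : Int) 1).map (fun _ => (0 : Int)), 0, 1)).1 = _
  rw [h0, foldl_const_iterate (pvStepA (L : Int)), hlen, pvIterA L hL n]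

-- B's result, characterised in closed form
lemma pvB_char (n L : Nat) (hL : 2 ≤ L) (hn : 1 ≤ n) :
    obliczSek_alt (n : Int) (L : Int)
      = (List.range L).map (fun j =>
          (if j = 0 ∨ j = L - 1 then 1 else 2) * ((n / (2 * L - 2) : Nat) : Int)
            + (pvCnt L (n % (2 * L - 2)) j : Int)) := by
  have hp : (2 : Int) * (L : Int) - 2 = ((2 * L - 2 : Nat) : Int) := by omega
  have hfull : PySem.Int.floordiv (n : Int) (2 * (L : Int) - 2)
      = ((n / (2 * L - 2) : Nat) : Int) := by
    rw [hp]; exact_mod_cast PySem.Int.floordiv_natCast n (2 * L - 2)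
  have hrem : PySem.Int.mod (n : Int) (2 * (L : Int) - 2)
      = ((n % (2 * L - 2) : Nat) : Int) := by
    rw [hp]; exact_mod_cast PySem.Int.mod_natCast n (2 * L - 2)
  unfold obliczSek_alt
  rw [if_neg (by omega), if_neg (by omega)]
  simp only [hfull, hrem, Int.toNat_natCast]
  rw [pvTab L (2 * ((n / (2 * L - 2) : Nat) : Int)) ((n / (2 * L - 2) : Nat) : Int)
    (fun j => (if j = 0 ∨ j = L - 1 then 1 else 2) * ((n / (2 * L - 2) : Nat) : Int))
    (fun k hk => by
      beta_reduce
      rcases eq_or_ne k 0 with h0 | h0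
      · subst h0; simp
      · rcases eq_or_ne k (L - 1) with h1 | h1
        · rw [if_pos (Or.inr h1), if_neg (by omega), if_pos h1.symm, one_mul]
        · rw [if_neg (by omega), if_neg (by omega), if_neg (by omega)])]
  exact pvFoldB L hL _ _ (le_of_lt (Nat.mod_lt n (by omega)))

lemma pvMain (n L : Nat) (hL : 2 ≤ L) (hn : 1 ≤ n) :
    obliczSek (n : Int) (L : Int) = obliczSek_alt (n : Int) (L : Int) := by
  rw [pvA_char n L hL, pvB_char n L hL hn]
  apply List.map_congr_left
  intro j hj
  rw [List.mem_range] at hj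
  have hdecomp : pvCnt L n j
      = (n / (2 * L - 2)) * pvCnt L (2 * L - 2) j + pvCnt L (n % (2 * L - 2)) j := by
    conv_lhs => rw [← Nat.div_add_mod n (2 * L - 2)]
    rw [pvCnt_decompose]
  rw [hdecomp, pvCnt_full L j hL hj]
  push_cast
  split_ifs <;> ring

lemma pvZeros (dlug level : Int) (hd : dlug ≤ 0) :
    obliczSek dlug level = obliczSek_alt dlug level := by
  unfold obliczSek obliczSek_alt
  rw [PySem.List.pyRange_one_eq_nil hd, if_pos hd]
  simp [List.map_const', PySem.List.length_pyRange_one]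

-- ===== VERDICT (by name: the statement is the Claim_ definition above) =====
theorem obliczSek_spec : Claim_equal_obliczSek := by
  intro dlug level _ hpre
  unfold Spec_obliczSek
  by_cases hd : dlug ≤ 0
  · exact pvZeros dlug level hd
  · rcases hpre with h2 | h0 | h1
    · have h1d : 1 ≤ dlug := by omega
      obtain ⟨n, rfl⟩ : ∃ n : Nat, dlug = (n : Int) :=
        ⟨dlug.toNat, (Int.toNat_of_nonneg (by omega)).symm⟩
      obtain ⟨L, rfl⟩ : ∃ L : Nat, level = (L : Int) :=
        ⟨level.toNat, (Int.toNat_of_nonneg (by omega)).symm⟩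
      exact pvMain n L (by exact_mod_cast h2) (by exact_mod_cast h1d)
    · omega
    · have : dlug = 1 := by omega
      rw [this, h1.1]
      decide

@[simp]
theorem obliczSek_raises : Claim_raises_obliczSek := by
  unfold Claim_raises_obliczSek
  constructor
  · intro dlug level _ hr
    unfold Raises_obliczSek at hr
    unfold Pre_obliczSek
    omega
  · exact ⟨by decide, by decide, by decide⟩
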